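-- pv_equiv track=rewrite | github.com/saaritssinha93/backtesting | eqidv2/avwap_ml_backtest_runner.py | _max_consecutive
-- ===== SOURCE A (Python) =====
-- from typing import Any, Dict, List, Optional, Tuple
--
-- def _max_consecutive(seq: List[int], target: int) -> int:
--     best = 0
--     cur = 0
--     for x in seq:
--         if x == target:
--             cur += 1
--             best = max(best, cur)
--         else:
--             cur = 0
--     return best
-- ===== SOURCE B (Python) =====
-- from itertools import groupby
--
--
-- def _max_consecutive(seq, target):
--     return max((sum(1 for _ in grp) for key, grp in groupby(seq) if key == target),
--                default=0)
-- ===== Notes on version B (the rewrite author's own statement) =====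
-- stated objective: idiomatic
-- what changed: Replaces the manual best/cur counter loop with itertools.groupby: collapse the list into maximal runs of equal values and take the max length of the runs equal to target (default 0).
import Mathlib
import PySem

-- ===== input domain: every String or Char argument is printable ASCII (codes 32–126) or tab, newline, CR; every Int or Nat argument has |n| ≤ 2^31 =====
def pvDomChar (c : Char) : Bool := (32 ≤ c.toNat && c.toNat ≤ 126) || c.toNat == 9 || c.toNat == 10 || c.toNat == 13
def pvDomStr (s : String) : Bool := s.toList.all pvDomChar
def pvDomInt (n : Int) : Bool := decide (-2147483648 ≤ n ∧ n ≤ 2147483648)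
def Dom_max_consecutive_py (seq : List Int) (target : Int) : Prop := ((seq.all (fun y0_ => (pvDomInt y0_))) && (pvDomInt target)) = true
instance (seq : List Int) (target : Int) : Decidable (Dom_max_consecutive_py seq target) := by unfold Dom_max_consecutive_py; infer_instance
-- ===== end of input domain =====

-- B replaces A's manual best/cur counter loop with itertools.groupby over maximal runs (idiomatic; same O(n) cost).


-- ===== PORT A =====
def max_consecutive_py (seq : List Int) (target : Int) : Int :=
  (seq.foldl
    (fun (st : Int × Int) x =>
      if x = target then (max st.1 (st.2 + 1), st.2 + 1) else (st.1, 0))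
    (0, 0)).1

-- ===== PORT B =====
-- hand port of itertools.groupby restricted to what Source B uses: maximal runs as (key, run length)
def pvRuns (seq : List Int) : List (Int × Int) :=
  match seq with
  | [] => []
  | x :: xs =>
    match pvRuns xs with
    | [] => [(x, 1)]
    | (k, n) :: rest => if k = x then (x, n + 1) :: rest else (x, 1) :: (k, n) :: rest

-- B: max over the lengths of the target-runs, default 0 (empty max)
def max_consecutive_py_alt (seq : List Int) (target : Int) : Int :=
  ((pvRuns seq).filterMap (fun kn => if kn.1 = target then some kn.2 else none)).foldr max 0

-- ===== PRECONDITION & SPEC =====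
def Spec_max_consecutive_py (seq : List Int) (target : Int) (out : Int) : Prop := out = max_consecutive_py_alt seq target
instance (seq : List Int) (target : Int) (out : Int) : Decidable (Spec_max_consecutive_py seq target out) := by unfold Spec_max_consecutive_py; infer_instance

-- ===== CLAIM (what is proved, stated in full; the proofs are below) =====
def Claim_equal_max_consecutive_py : Prop := ∀ (seq : List Int) (target : Int), Dom_max_consecutive_py seq target → Spec_max_consecutive_py seq target (max_consecutive_py seq target)

-- ===== LEMMAS AND PROOFS =====

-- max over the target-run lengths of a group list (same expression as B's port)
def pvM (t : Int) (l : List (Int × Int)) : Int :=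
  (l.filterMap (fun kn => if kn.1 = t then some kn.2 else none)).foldr max 0

-- pvM with the first (leftmost) run, if it is a target-run, extended by c
def pvM' (t c : Int) (l : List (Int × Int)) : Int :=
  match l with
  | [] => 0
  | (k, n) :: rest => if k = t then max (c + n) (pvM t rest) else pvM t rest

lemma pvM_nonneg (t : Int) (l : List (Int × Int)) : 0 ≤ pvM t l := by
  induction l with
  | nil => simp [pvM]
  | cons kn rest ih =>
    simp only [pvM, List.filterMap_cons] at *
    split <;> simp_all

lemma pvM'_zero (t : Int) (l : List (Int × Int)) : pvM' t 0 l = pvM t l := by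
  cases l with
  | nil => simp [pvM', pvM]
  | cons kn rest =>
    obtain ⟨k, n⟩ := kn
    by_cases h : k = t <;> simp [pvM', pvM, h]

lemma pvRuns_pos (xs : List Int) : ∀ kn ∈ pvRuns xs, 1 ≤ kn.2 := by
  induction xs with
  | nil => simp [pvRuns]
  | cons x xs ih =>
    intro kn hkn
    simp only [pvRuns] at hkn
    cases hG : pvRuns xs with
    | nil => rw [hG] at hkn; simp at hkn; simp [hkn]
    | cons hd rest =>
      obtain ⟨k, n⟩ := hd
      rw [hG] at hkn
      have hn : 1 ≤ n := ih (k, n) (by rw [hG]; exact List.mem_cons_self)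
      by_cases h : k = x
      · simp [h] at hkn
        rcases hkn with h1 | h2
        · simp [h1]; omega
        · exact ih kn (by rw [hG]; exact List.mem_cons_of_mem _ h2)
      · simp [h] at hkn
        rcases hkn with h1 | h2 | h3
        · simp [h1]
        · simp [h2]; omega
        · exact ih kn (by rw [hG]; exact List.mem_cons_of_mem _ h3)

lemma foldl_char (target : Int) (xs : List Int) :
    ∀ b c : Int, 0 ≤ b →
      (xs.foldl
        (fun (st : Int × Int) x =>
          if x = target then (max st.1 (st.2 + 1), st.2 + 1) else (st.1, 0))
        (b, c)).1 = max b (pvM' target c (pvRuns xs)) := by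
  induction xs with
  | nil => intro b c hb; simp [pvRuns, pvM']; omega
  | cons x xs ih =>
    intro b c hb
    simp only [List.foldl_cons]
    by_cases hx : x = target
    · rw [if_pos hx, ih (max b (c + 1)) (c + 1) (le_max_of_le_left hb)]
      simp only [pvRuns]
      cases hG : pvRuns xs with
      | nil =>
        simp [pvM', pvM, hx]
      | cons hd rest =>
        obtain ⟨k, n⟩ := hd
        have hn : 1 ≤ n := pvRuns_pos xs (k, n) (by rw [hG]; exact List.mem_cons_self)
        by_cases hk : k = x
        · simp [pvM', pvM, hk, hx]
          omega
        · have hkt : ¬ k = target := fun h => hk (h.trans hx.symm)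
          simp [pvM', pvM, hkt, hx]
    · rw [if_neg hx, ih b 0 hb, pvM'_zero]
      simp only [pvRuns]
      cases hG : pvRuns xs with
      | nil => simp [pvM', pvM, hx]
      | cons hd rest =>
        obtain ⟨k, n⟩ := hd
        by_cases hk : k = x
        · simp [hk, pvM', pvM, hx]
        · simp [hk, pvM', hx]

-- ===== VERDICT (by name: the statement is the Claim_ definition above) =====
theorem max_consecutive_py_spec : Claim_equal_max_consecutive_py := by
  intro seq target _
  unfold Spec_max_consecutive_py max_consecutive_py max_consecutive_py_alt
  rw [foldl_char target seq 0 0 le_rfl, pvM'_zero]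
  have := pvM_nonneg target (pvRuns seq)
  unfold pvM at this ⊢
  omega
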